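-- pv_equiv track=rewrite | github.com/PratyushPriyamKuanr271776508/Leetcode_Fibonacci | 2555-maximize-win-from-two-segments/2555-maximize-win-from-two-segments.py | maximizeWin
-- ===== SOURCE A (Python) =====
-- from typing import List
--
-- def maximizeWin(prizePositions: List[int], k: int) -> int:
--
--     n = len(prizePositions)
--
--     # Function to check if it's possible to collect at least `x` prizes using two segments
--     def canCollectAtLeast(x):
--         left = 0
--         max_single_segment = [0] * n
--         prizes_in_window = 0
--
--         # First sliding window: Calculate the maximum number of prizes for one segment
--         for right in range(n):
--             while prizePositions[right] - prizePositions[left] > k: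
--                 left += 1
--             prizes_in_window = right - left + 1
--             if right > 0:
--                 max_single_segment[right] = max(max_single_segment[right - 1], prizes_in_window)
--             else:
--                 max_single_segment[right] = prizes_in_window
--
--             # Check if the first segment alone is enough
--             if prizes_in_window >= x:
--                 return True
--
--         # Second sliding window: Combine two segments
--         left = 0
--         for right in range(n):
--             while prizePositions[right] - prizePositions[left] > k:
--                 left += 1
--             prizes_in_window = right - left + 1
--
--             # Try to combine this segment with a previous segment
--             if left > 0 and prizes_in_window + max_single_segment[left - 1] >= x:
--                 return True
--
--         return False
--
--     # Binary search for the maximum number of prizes that can be collected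
--     low, high = 0, n
--     while low < high:
--         mid = (low + high + 1) // 2  # Middle point of the binary search
--         if canCollectAtLeast(mid):
--             low = mid  # If we can collect at least `mid` prizes, search the higher range
--         else:
--             high = mid - 1  # Otherwise, search the lower range
--
--     return low
-- ===== SOURCE B (Python) =====
-- from typing import List
--
-- def maximizeWin(prizePositions: List[int], k: int) -> int:
--     # One sliding-window pass: dp[i] = best single-segment count among windows
--     # ending before index i; combine each window with the best earlier one.
--     dp = [0]
--     ans = 0
--     left = 0
--     for right in range(len(prizePositions)):
--         while prizePositions[right] - prizePositions[left] > k: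
--             left += 1
--         w = right - left + 1
--         dp.append(max(dp[right], w))
--         ans = max(ans, w + dp[left])
--     return ans
-- ===== Notes on version B (the rewrite author's own statement) =====
-- stated objective: faster
-- what changed: Replaces A's binary search over a repeated two-pass feasibility check (O(n log n)) with a single sliding-window pass that tracks the best earlier segment in a prefix-max table and maximizes window+best directly (O(n)).
import Mathlib
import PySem

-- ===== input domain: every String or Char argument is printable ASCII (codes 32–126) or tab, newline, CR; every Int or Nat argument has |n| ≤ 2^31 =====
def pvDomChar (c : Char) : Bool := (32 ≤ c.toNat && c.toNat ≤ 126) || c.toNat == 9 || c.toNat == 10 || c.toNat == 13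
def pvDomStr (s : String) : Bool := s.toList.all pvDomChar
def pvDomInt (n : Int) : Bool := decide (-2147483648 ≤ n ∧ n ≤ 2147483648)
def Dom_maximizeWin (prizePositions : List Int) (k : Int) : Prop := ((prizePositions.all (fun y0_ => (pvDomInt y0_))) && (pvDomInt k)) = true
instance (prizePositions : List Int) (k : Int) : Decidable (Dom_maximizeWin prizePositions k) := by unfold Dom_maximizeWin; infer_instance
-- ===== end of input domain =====

-- B replaces A's binary search over a two-pass feasibility check with a single
-- sliding-window pass combining each window with a running best-prior-segment table (O(n) vs O(n log n)).


-- ===== PORT A =====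
-- the inner `while prizePositions[right] - prizePositions[left] > k: left += 1`;
-- fuel (= length - left at every call) only makes the recursion structural: inside Pre_ the loop stops at left ≤ right
def pvAdvA (pos : List Int) (k : Int) (r : Nat) : Nat → Nat → Nat
  | 0, left => left
  | fuel + 1, left =>
      if pos.getD r 0 - pos.getD left 0 > k then pvAdvA pos k r fuel (left + 1) else left

-- first loop of canCollectAtLeast; `none` = the Python `return True`, `some ms` = fell through with max_single = ms
def pvLoop1A (pos : List Int) (k x : Int) : List Nat → Nat → List Int → Option (List Int)
  | [], _, ms => some ms
  | r :: rs, left, ms =>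
      let left' := pvAdvA pos k r (pos.length - left) left
      let w : Int := (r : Int) - (left' : Int) + 1
      let m : Int := if r > 0 then max (ms.getD (r - 1) 0) w else w
      let ms' := ms ++ [m]
      if w ≥ x then none else pvLoop1A pos k x rs left' ms'

-- second loop of canCollectAtLeast
def pvLoop2A (pos : List Int) (k x : Int) (ms : List Int) : List Nat → Nat → Bool
  | [], _ => false
  | r :: rs, left =>
      let left' := pvAdvA pos k r (pos.length - left) left
      let w : Int := (r : Int) - (left' : Int) + 1
      if 0 < left' ∧ w + ms.getD (left' - 1) 0 ≥ x then true
      else pvLoop2A pos k x ms rs left'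

def pvCanCollectA (pos : List Int) (k x : Int) : Bool :=
  match pvLoop1A pos k x (List.range pos.length) 0 [] with
  | none => true
  | some ms => pvLoop2A pos k x ms (List.range pos.length) 0

-- the binary-search while loop; fuel (= high - low at the initial call) only bounds the
-- iteration count structurally — the gap shrinks by at least one per iteration
def pvBSearchA (pos : List Int) (k : Int) : Nat → Int → Int → Int
  | 0, low, _ => low
  | fuel + 1, low, high =>
      if low < high then
        let mid := PySem.Int.floordiv (low + high + 1) 2
        if pvCanCollectA pos k mid then pvBSearchA pos k fuel mid high
        else pvBSearchA pos k fuel low (mid - 1)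
      else low

def maximizeWin (prizePositions : List Int) (k : Int) : Int :=
  pvBSearchA prizePositions k prizePositions.length 0 (prizePositions.length : Int)

-- ===== PORT B =====
-- the same inner while loop, as written in Source B (fuel = length - left, a totality guard only)
def pvAdvB (pos : List Int) (k : Int) (r : Nat) : Nat → Nat → Nat
  | 0, left => left
  | fuel + 1, left =>
      if pos.getD r 0 - pos.getD left 0 > k then pvAdvB pos k r fuel (left + 1) else left

-- the single for-loop of Source B, threading (left, dp, ans)
def pvLoopB (pos : List Int) (k : Int) : List Nat → Nat → List Int → Int → Int
  | [], _, _, ans => ans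
  | r :: rs, left, dp, ans =>
      let left' := pvAdvB pos k r (pos.length - left) left
      let w : Int := (r : Int) - (left' : Int) + 1
      let dp' := dp ++ [max (dp.getD r 0) w]
      let ans' := max ans (w + dp'.getD left' 0)
      pvLoopB pos k rs left' dp' ans'

def maximizeWin_alt (prizePositions : List Int) (k : Int) : Int :=
  pvLoopB prizePositions k (List.range prizePositions.length) 0 [0] 0

-- ===== PRECONDITION & SPEC =====
-- Pre_ excludes k < 0 with a nonempty list: there the inner while loop's left pointer
-- runs past the end and the Python A raises IndexError (B raises identically).
def Pre_maximizeWin (prizePositions : List Int) (k : Int) : Prop :=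
  0 ≤ k ∨ prizePositions = []
instance (prizePositions : List Int) (k : Int) : Decidable (Pre_maximizeWin prizePositions k) := by unfold Pre_maximizeWin; infer_instance

def pvWitness_maximizeWin : List Int × Int := ([1, 1, 2, 2, 3, 3, 5], 2)

def Spec_maximizeWin (prizePositions : List Int) (k : Int) (out : Int) : Prop := out = maximizeWin_alt prizePositions k
instance (prizePositions : List Int) (k : Int) (out : Int) : Decidable (Spec_maximizeWin prizePositions k out) := by unfold Spec_maximizeWin; infer_instance

-- ===== CLAIM (what is proved, stated in full; the proofs are below) =====
def Claim_equal_maximizeWin : Prop := ∀ (prizePositions : List Int) (k : Int), Dom_maximizeWin prizePositions k → Pre_maximizeWin prizePositions k → Spec_maximizeWin prizePositions k (maximizeWin prizePositions k)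

-- ===== LEMMAS AND PROOFS =====

-- ghost sequence of left pointers, window sizes, prefix maxima
def gL (pos : List Int) (k : Int) : Nat → Nat
  | 0 => pvAdvA pos k 0 pos.length 0
  | r + 1 => pvAdvA pos k (r + 1) (pos.length - gL pos k r) (gL pos k r)

def gPrev (pos : List Int) (k : Int) : Nat → Nat
  | 0 => 0
  | r + 1 => gL pos k r

def gW (pos : List Int) (k : Int) (r : Nat) : Int := (r : Int) - (gL pos k r : Int) + 1

def gPM (pos : List Int) (k : Int) : Nat → Int
  | 0 => gW pos k 0
  | r + 1 => max (gPM pos k r) (gW pos k (r + 1))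

def gDP (pos : List Int) (k : Int) : Nat → Int
  | 0 => 0
  | i + 1 => max (gDP pos k i) (gW pos k i)

def gVal (pos : List Int) (k : Int) (r : Nat) : Int := gW pos k r + gDP pos k (gL pos k r)

def gM (pos : List Int) (k : Int) : Nat → Int
  | 0 => 0
  | r + 1 => max (gM pos k r) (gVal pos k r)

theorem pvAdvB_eq_A (pos : List Int) (k : Int) (r : Nat) :
    ∀ fuel left, pvAdvB pos k r fuel left = pvAdvA pos k r fuel left := by
  intro fuel
  induction fuel with
  | zero => intro left; rfl
  | succ n ih =>
      intro left
      simp only [pvAdvB, pvAdvA]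
      split
      · exact ih (left + 1)
      · rfl

theorem gL_succ (pos : List Int) (k : Int) (r : Nat) :
    gL pos k r = pvAdvA pos k r (pos.length - gPrev pos k r) (gPrev pos k r) := by
  cases r <;> rfl

theorem pvAdvA_le (pos : List Int) (k : Int) (hk : 0 ≤ k) (r : Nat) (hr : r < pos.length) :
    ∀ fuel left, left ≤ r → pvAdvA pos k r fuel left ≤ r := by
  intro fuel
  induction fuel with
  | zero => intro left hlr; exact hlr
  | succ n ih =>
      intro left hlr
      simp only [pvAdvA]
      split
      · rename_i hcond
        rcases Nat.lt_or_ge left r with hlt | hge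
        · exact ih (left + 1) (by omega)
        · exfalso
          have : left = r := by omega
          subst this
          omega
      · exact hlr

theorem gL_le (pos : List Int) (k : Int) (hk : 0 ≤ k) :
    ∀ r, r < pos.length → gL pos k r ≤ r := by
  intro r
  induction r with
  | zero => intro h; exact pvAdvA_le pos k hk 0 h pos.length 0 (le_refl 0)
  | succ n ih =>
      intro h
      have hprev : gL pos k n ≤ n := ih (by omega)
      exact pvAdvA_le pos k hk (n+1) h (pos.length - gL pos k n) (gL pos k n) (by omega)

theorem gW_pos (pos : List Int) (k : Int) (hk : 0 ≤ k) (r : Nat) (hr : r < pos.length) :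
    1 ≤ gW pos k r := by
  have := gL_le pos k hk r hr
  unfold gW; omega

theorem gDP_nonneg (pos : List Int) (k : Int) (hk : 0 ≤ k) :
    ∀ i, i ≤ pos.length → 0 ≤ gDP pos k i := by
  intro i
  induction i with
  | zero => intro _; simp [gDP]
  | succ n ih =>
      intro h
      have h1 := ih (by omega)
      have h2 := gW_pos pos k hk n (by omega)
      simp only [gDP]; omega

theorem gDP_le (pos : List Int) (k : Int) (hk : 0 ≤ k) :
    ∀ i, i ≤ pos.length → gDP pos k i ≤ (i : Int) := by
  intro i
  induction i with
  | zero => intro _; simp [gDP]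
  | succ n ih =>
      intro h
      have h1 := ih (by omega)
      have h2 := gL_le pos k hk n (by omega)
      simp only [gDP]
      unfold gW
      omega

theorem gPM_eq_gDP (pos : List Int) (k : Int) (hk : 0 ≤ k) :
    ∀ r, r < pos.length → gPM pos k r = gDP pos k (r + 1) := by
  intro r
  induction r with
  | zero =>
      intro h
      have := gW_pos pos k hk 0 h
      simp only [gPM, gDP]
      omega
  | succ n ih =>
      intro h
      simp only [gPM, gDP, ih (by omega)]

-- msg i = the max_single prefix built after i iterations
def gMS (pos : List Int) (k : Int) (i : Nat) : List Int := (List.range i).map (gPM pos k)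

theorem gMS_getD (pos : List Int) (k : Int) (i j : Nat) (h : j < i) :
    (gMS pos k i).getD j 0 = gPM pos k j := by
  unfold gMS
  rw [List.getD_eq_getElem?_getD, List.getElem?_map]
  simp [List.getElem?_range h]

theorem loop1_inv (pos : List Int) (k x : Int) :
    ∀ j i, i + j = pos.length →
      pvLoop1A pos k x (List.range' i j) (gPrev pos k i) (gMS pos k i) =
        if (List.range' i j).all (fun r => decide (gW pos k r < x)) then some (gMS pos k pos.length)
        else none := by
  intro j
  induction j with
  | zero =>
      intro i h
      have hi : i = pos.length := by omega
      subst hi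
      simp [pvLoop1A, List.range']
  | succ m ih =>
      intro i h
      rw [List.range'_succ]
      simp only [pvLoop1A]
      rw [← gL_succ pos k i]
      have hw : (i : Int) - (gL pos k i : Int) + 1 = gW pos k i := rfl
      rw [hw]
      have hm : (if i > 0 then max ((gMS pos k i).getD (i - 1) 0) (gW pos k i) else gW pos k i) = gPM pos k i := by
        cases i with
        | zero => simp [gPM]
        | succ n =>
            rw [if_pos (by omega), Nat.add_sub_cancel, gMS_getD pos k (n+1) n (by omega)]
            simp only [gPM]
      have hms : gMS pos k i ++ [gPM pos k i] = gMS pos k (i + 1) := by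
        unfold gMS
        rw [List.range_succ, List.map_append]
        rfl
      rw [hm, hms]
      by_cases hge : gW pos k i ≥ x
      · rw [if_pos hge, List.all_cons]
        simp [show ¬ (gW pos k i < x) by omega]
      · rw [if_neg hge]
        have hprev : gL pos k i = gPrev pos k (i + 1) := rfl
        rw [hprev, ih (i + 1) (by omega), List.all_cons]
        simp only [show (decide (gW pos k i < x)) = true from decide_eq_true (by omega), Bool.true_and]

theorem loop2_inv (pos : List Int) (k x : Int) (hk : 0 ≤ k) :
    ∀ j i, i + j = pos.length →
      pvLoop2A pos k x (gMS pos k pos.length) (List.range' i j) (gPrev pos k i) =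
        (List.range' i j).any
          (fun r => decide (0 < gL pos k r ∧ gW pos k r + gDP pos k (gL pos k r) ≥ x)) := by
  intro j
  induction j with
  | zero => intro i h; simp [pvLoop2A]
  | succ m ih =>
      intro i h
      rw [List.range'_succ]
      simp only [pvLoop2A]
      rw [← gL_succ pos k i]
      have hw : (i : Int) - (gL pos k i : Int) + 1 = gW pos k i := rfl
      have hL := gL_le pos k hk i (by omega)
      by_cases hc : 0 < gL pos k i ∧ gW pos k i + gDP pos k (gL pos k i) ≥ x
      · have hget : (gMS pos k pos.length).getD (gL pos k i - 1) 0 = gDP pos k (gL pos k i) := by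
          rw [gMS_getD pos k pos.length (gL pos k i - 1) (by omega),
              gPM_eq_gDP pos k hk (gL pos k i - 1) (by omega)]
          congr 1
          omega
        rw [hw, hget, if_pos hc, List.any_cons]
        simp [hc.1, hc.2]
      · have hcond : ¬ (0 < gL pos k i ∧ (i:Int) - (gL pos k i : Int) + 1 + (gMS pos k pos.length).getD (gL pos k i - 1) 0 ≥ x) := by
          intro hcc
          apply hc
          refine ⟨hcc.1, ?_⟩
          have hget : (gMS pos k pos.length).getD (gL pos k i - 1) 0 = gDP pos k (gL pos k i) := by
            rw [gMS_getD pos k pos.length (gL pos k i - 1) (by omega),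
                gPM_eq_gDP pos k hk (gL pos k i - 1) (by omega)]
            congr 1
            omega
          rw [hget] at hcc
          exact hcc.2
        rw [if_neg hcond]
        have hprev : gL pos k i = gPrev pos k (i + 1) := rfl
        rw [hprev, ih (i + 1) (by omega), List.any_cons]
        have hfalse : decide (0 < gL pos k i ∧ gW pos k i + gDP pos k (gL pos k i) ≥ x) = false :=
          decide_eq_false hc
        rw [hfalse, Bool.false_or]

-- gM n is attained and dominates
theorem gM_spec (pos : List Int) (k : Int) :
    ∀ i, (∀ r, r < i → gVal pos k r ≤ gM pos k i) ∧
         (gM pos k i = 0 ∨ ∃ r, r < i ∧ gVal pos k r = gM pos k i) := by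
  intro i
  induction i with
  | zero => exact ⟨fun r hr => absurd hr (by omega), Or.inl rfl⟩
  | succ n ih =>
      constructor
      · intro r hr
        rcases Nat.lt_or_ge r n with hlt | hge
        · have := ih.1 r hlt
          simp only [gM]; omega
        · have : r = n := by omega
          subst this
          simp only [gM]; omega
      · rcases le_or_gt (gVal pos k n) (gM pos k n) with hle | hlt
        · rcases ih.2 with h0 | ⟨r, hr, hv⟩
          · rcases le_or_gt (gVal pos k n) 0 with h1 | h1
            · left; simp only [gM]; omega
            · right; exact ⟨n, by omega, by simp only [gM]; omega⟩
          · right; exact ⟨r, by omega, by simp only [gM]; omega⟩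
        · right; exact ⟨n, by omega, by simp only [gM]; omega⟩

theorem canCollect_eq (pos : List Int) (k x : Int) (hk : 0 ≤ k) (hn : 0 < pos.length) :
    pvCanCollectA pos k x = decide (x ≤ gM pos k pos.length) := by
  unfold pvCanCollectA
  have h1 := loop1_inv pos k x pos.length 0 (by omega)
  have hr0 : List.range pos.length = List.range' 0 pos.length := by
    rw [List.range_eq_range']
  have hprev0 : gPrev pos k 0 = 0 := rfl
  have hms0 : gMS pos k 0 = [] := rfl
  rw [hr0]
  rw [hprev0, hms0] at h1
  rw [h1]
  -- existence form
  by_cases hex : ∃ r, r < pos.length ∧ x ≤ gVal pos k r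
  · -- canCollect should be true, and x ≤ gM
    obtain ⟨r, hrn, hrv⟩ := hex
    have hMx : x ≤ gM pos k pos.length := le_trans hrv ((gM_spec pos k pos.length).1 r hrn)
    rw [decide_eq_true hMx]
    by_cases hall : (List.range' 0 pos.length).all (fun r => decide (gW pos k r < x)) = true
    · rw [if_pos hall]
      have h2 := loop2_inv pos k x hk pos.length 0 (by omega)
      rw [hprev0] at h2
      rw [if_pos hall] at *
      show pvLoop2A pos k x (gMS pos k pos.length) (List.range' 0 pos.length) 0 = true
      rw [h2]
      -- from hall, gW r < x, so the combined part must reach x, hence gL r > 0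
      have hWr : gW pos k r < x := by
        have := (List.all_eq_true.mp hall) r (by
          rw [List.mem_range'_1]; omega)
        simpa using this
      have hgL : 0 < gL pos k r := by
        by_contra hzero
        have : gL pos k r = 0 := by omega
        unfold gVal at hrv
        rw [this] at hrv
        simp only [gDP] at hrv
        omega
      rw [List.any_eq_true]
      refine ⟨r, by rw [List.mem_range'_1]; omega, ?_⟩
      simp only [decide_eq_true_eq]
      exact ⟨hgL, hrv⟩
    · rw [if_neg hall]
  · -- no r reaches x: canCollect false, and gM < x
    push Not at hex
    have hall : (List.range' 0 pos.length).all (fun r => decide (gW pos k r < x)) = true := by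
      rw [List.all_eq_true]
      intro r hr
      rw [List.mem_range'_1] at hr
      have hv := hex r (by omega)
      have hdp := gDP_nonneg pos k hk (gL pos k r) (by
        have := gL_le pos k hk r (by omega); omega)
      unfold gVal at hv
      simp only [decide_eq_true_eq]
      omega
    rw [if_pos hall]
    show pvLoop2A pos k x (gMS pos k pos.length) (List.range' 0 pos.length) 0 = decide (x ≤ gM pos k pos.length)
    have h2 := loop2_inv pos k x hk pos.length 0 (by omega)
    rw [hprev0] at h2
    rw [h2]
    have hany : (List.range' 0 pos.length).any
        (fun r => decide (0 < gL pos k r ∧ gW pos k r + gDP pos k (gL pos k r) ≥ x)) = false := by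
      rw [List.any_eq_false]
      intro r hr
      rw [List.mem_range'_1] at hr
      have hv := hex r (by omega)
      simp only [decide_eq_true_eq]
      intro hcc
      exact absurd hcc.2 (by unfold gVal at hv; omega)
    rw [hany]
    have hMlt : gM pos k pos.length < x := by
      rcases (gM_spec pos k pos.length).2 with h0 | ⟨r, hrn, hv⟩
      · -- gM = 0 but gVal 0 ≥ 1, so gM ≥ 1 actually; handle via hex at 0
        have := hex 0 hn
        have hW0 := gW_pos pos k hk 0 hn
        have hdp := gDP_nonneg pos k hk (gL pos k 0) (by
          have := gL_le pos k hk 0 hn; omega)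
        unfold gVal at this
        omega
      · have := hex r hrn
        omega
    simp [not_le.mpr hMlt]

theorem gM_bounds (pos : List Int) (k : Int) (hk : 0 ≤ k) :
    0 ≤ gM pos k pos.length ∧ gM pos k pos.length ≤ (pos.length : Int) := by
  constructor
  · induction pos.length with
    | zero => simp [gM]
    | succ n ih => simp only [gM]; omega
  · have hval : ∀ r, r < pos.length → gVal pos k r ≤ (r : Int) + 1 := by
      intro r hr
      have hL := gL_le pos k hk r hr
      have hdp := gDP_le pos k hk (gL pos k r) (by omega)
      unfold gVal gW
      omega
    have : ∀ i, i ≤ pos.length → gM pos k i ≤ (i : Int) := by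
      intro i
      induction i with
      | zero => intro _; simp [gM]
      | succ n ih =>
          intro h
          have h1 := ih (by omega)
          have h2 := hval n (by omega)
          simp only [gM]
          push_cast
          omega
    exact this pos.length (le_refl _)

theorem bsearch_correct (pos : List Int) (k : Int) (hk : 0 ≤ k) (hn : 0 < pos.length) :
    ∀ (fuel : Nat) (low high : Int), (high - low).toNat ≤ fuel →
      0 ≤ low → low ≤ gM pos k pos.length → gM pos k pos.length ≤ high →
      pvBSearchA pos k fuel low high = gM pos k pos.length := by
  intro fuel
  induction fuel with
  | zero =>
      intro low high hf h0 hlM hMh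
      simp only [pvBSearchA]
      omega
  | succ n ih =>
      intro low high hf h0 hlM hMh
      simp only [pvBSearchA]
      by_cases hlh : low < high
      · rw [if_pos hlh]
        have hmid : low + 1 ≤ PySem.Int.floordiv (low + high + 1) 2 ∧
            PySem.Int.floordiv (low + high + 1) 2 ≤ high := by
          have := PySem.Int.floordiv_two_mid_bounds (lo := low + 1) (hi := high) (by omega)
          have h2 : low + 1 + high = low + high + 1 := by ring
          rw [h2] at this
          exact this
        rw [canCollect_eq pos k _ hk hn]
        by_cases hmM : PySem.Int.floordiv (low + high + 1) 2 ≤ gM pos k pos.length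
        · rw [decide_eq_true hmM, if_pos rfl]
          exact ih _ high (by omega) (by omega) hmM hMh
        · rw [decide_eq_false hmM]
          simp only [Bool.false_eq_true, if_false]
          exact ih low _ (by omega) h0 hlM (by omega)
      · rw [if_neg hlh]
        omega

-- B-side invariant: dp list after i iterations is [gDP 0, …, gDP i]
def gDPL (pos : List Int) (k : Int) (i : Nat) : List Int := (List.range (i + 1)).map (gDP pos k)

theorem gDPL_getD (pos : List Int) (k : Int) (i j : Nat) (h : j ≤ i) :
    (gDPL pos k i).getD j 0 = gDP pos k j := by
  unfold gDPL
  rw [List.getD_eq_getElem?_getD, List.getElem?_map]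
  simp [List.getElem?_range (show j < i + 1 by omega)]

theorem loopB_inv (pos : List Int) (k : Int) (hk : 0 ≤ k) :
    ∀ j i, i + j = pos.length →
      pvLoopB pos k (List.range' i j) (gPrev pos k i) (gDPL pos k i) (gM pos k i) =
        gM pos k pos.length := by
  intro j
  induction j with
  | zero =>
      intro i h
      have hi : i = pos.length := by omega
      subst hi
      simp only [pvLoopB, List.range']
  | succ m ih =>
      intro i h
      rw [List.range'_succ]
      simp only [pvLoopB]
      rw [pvAdvB_eq_A pos k i (pos.length - gPrev pos k i) (gPrev pos k i), ← gL_succ pos k i]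
      have hw : (i : Int) - (gL pos k i : Int) + 1 = gW pos k i := rfl
      have hdprd : (gDPL pos k i).getD i 0 = gDP pos k i := gDPL_getD pos k i i (le_refl i)
      have hdp' : gDPL pos k i ++ [max (gDP pos k i) (gW pos k i)] = gDPL pos k (i + 1) := by
        unfold gDPL
        rw [List.range_succ (n := i + 1), List.map_append]
        rfl
      have hLle : gL pos k i ≤ i + 1 := by
        have := gL_le pos k hk i (by omega); omega
      have hansrd : (gDPL pos k (i + 1)).getD (gL pos k i) 0 = gDP pos k (gL pos k i) :=
        gDPL_getD pos k (i + 1) (gL pos k i) hLle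
      rw [hw, hdprd, hdp', hansrd]
      have hval : max (gM pos k i) (gW pos k i + gDP pos k (gL pos k i)) = gM pos k (i + 1) := by
        simp only [gM, gVal]
      have hprev : gL pos k i = gPrev pos k (i + 1) := rfl
      rw [hval, hprev]
      exact ih (i + 1) (by omega)

theorem maximizeWin_alt_eq (pos : List Int) (k : Int) (hk : 0 ≤ k) :
    maximizeWin_alt pos k = gM pos k pos.length := by
  unfold maximizeWin_alt
  have h := loopB_inv pos k hk pos.length 0 (by omega)
  rw [List.range_eq_range']
  exact h

-- ===== VERDICT (by name: the statement is the Claim_ definition above) =====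
theorem maximizeWin_spec : Claim_equal_maximizeWin := by
  intro pos k _hdom hpre
  unfold Spec_maximizeWin
  rcases hpre with hk | hempty
  · rcases Nat.eq_zero_or_pos pos.length with hn | hn
    · -- empty list
      have hpos : pos = [] := List.length_eq_zero_iff.mp hn
      subst hpos
      show maximizeWin [] k = maximizeWin_alt [] k
      simp [maximizeWin, maximizeWin_alt, pvBSearchA, pvLoopB]
    · unfold maximizeWin
      rw [maximizeWin_alt_eq pos k hk]
      have hb := gM_bounds pos k hk
      exact bsearch_correct pos k hk hn pos.length 0 (pos.length : Int) (by omega) (le_refl 0) (by omega) (by omega)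
  · subst hempty
    show maximizeWin [] k = maximizeWin_alt [] k
    simp [maximizeWin, maximizeWin_alt, pvBSearchA, pvLoopB]
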